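-- pv_equiv track=rewrite | github.com/nobu1474/KDA | core/vr_complex.py | get_facets
-- ===== SOURCE A (Python) =====
-- import itertools
--
-- def get_facets(simplices, dimension=None):
--     """Extract maximal simplices (facets) from a simplicial complex."""
--     candidate_by_dim = {
--         dim: list(simplices.get(dim, []))
--         for dim in sorted(simplices.keys(), reverse=True)
--     }
--
--     higher_facet_sets = []
--     facets_by_dim = {}
--
--     for dim in sorted(candidate_by_dim.keys(), reverse=True):
--         current_candidates = candidate_by_dim[dim]
--         if not current_candidates:
--             continue
--
--         remaining = []
--         for simplex in current_candidates:
--             simplex_set = set(simplex)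
--             if not any(simplex_set.issubset(higher_facet) for higher_facet in higher_facet_sets):
--                 remaining.append(simplex)
--
--         facets_by_dim[dim] = remaining
--         higher_facet_sets.extend([set(simplex) for simplex in remaining])
--
--         remove_by_dim = {}
--         for facet in remaining:
--             facet_size = len(facet)
--             for subset_size in range(1, facet_size):
--                 remove_dim = subset_size - 1
--                 remove_by_dim.setdefault(remove_dim, set()).update(
--                     itertools.combinations(facet, subset_size)
--                 )
--
--         for lower_dim, remove_set in remove_by_dim.items():
--             if lower_dim not in candidate_by_dim or not candidate_by_dim[lower_dim]:
--                 continue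
--             candidate_by_dim[lower_dim] = [
--                 simplex
--                 for simplex in candidate_by_dim[lower_dim]
--                 if simplex not in remove_set
--             ]
--
--     facets = []
--     for dim in sorted(facets_by_dim.keys(), reverse=True):
--         facets.extend(facets_by_dim[dim])
--
--     if dimension is None:
--         return facets
--
--     target_size = int(dimension) + 1
--     return [facet for facet in facets if len(facet) == target_size]
-- ===== SOURCE B (Python) =====
-- def get_facets(simplices, dimension=None):
--     """Extract maximal simplices (facets) from a simplicial complex."""
--     facets = []
--     facet_sets = []
--     for dim in sorted(simplices, reverse=True):
--         kept = []
--         for s in simplices[dim]: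
--             vs = set(s)
--             if not any(vs <= t for t in facet_sets):
--                 kept.append(s)
--         facets.extend(kept)
--         facet_sets.extend(set(s) for s in kept)
--
--     if dimension is None:
--         return facets
--     target_size = int(dimension) + 1
--     return [f for f in facets if len(f) == target_size]
-- ===== Notes on version B (the rewrite author's own statement) =====
-- stated objective: simpler
-- what changed: B drops A's whole itertools.combinations pre-removal machinery (candidate_by_dim pruning, remove_by_dim sets) - it never changes the result, since every removed sub-tuple is also caught by the issubset test - leaving a single filter per dimension against the accepted higher-facet sets.
import Mathlib
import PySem

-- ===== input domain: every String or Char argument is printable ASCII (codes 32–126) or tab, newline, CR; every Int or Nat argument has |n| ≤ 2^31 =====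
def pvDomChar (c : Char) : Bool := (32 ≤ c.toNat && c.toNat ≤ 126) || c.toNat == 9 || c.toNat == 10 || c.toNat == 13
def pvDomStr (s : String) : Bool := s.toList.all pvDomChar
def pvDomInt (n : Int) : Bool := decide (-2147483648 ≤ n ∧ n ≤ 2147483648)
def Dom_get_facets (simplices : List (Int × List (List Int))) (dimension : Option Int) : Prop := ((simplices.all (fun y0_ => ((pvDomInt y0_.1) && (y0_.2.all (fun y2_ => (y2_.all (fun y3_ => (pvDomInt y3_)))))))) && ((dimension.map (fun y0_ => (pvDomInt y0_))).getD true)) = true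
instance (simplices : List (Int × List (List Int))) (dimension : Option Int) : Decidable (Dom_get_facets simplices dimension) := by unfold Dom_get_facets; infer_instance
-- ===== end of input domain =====

-- B drops A's combinations-based pre-removal pass (it never changes the result: every removed
-- candidate is also caught by the issubset test) and keeps one filter per dimension; objective: simpler.

-- ===== PORT A =====

-- remove_by_dim built from the accepted facets of one dimension (itertools.combinations block)
def gfRemoveByDim (remaining : List (List Int)) : PySem.Dict Int (PySem.Set (List Int)) :=
  remaining.foldl (fun rbd facet =>
    (PySem.List.pyRange 1 (facet.length : Int) 1).foldl (fun rbd k =>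
      rbd.modify (k - 1) PySem.Set.empty
        (fun st => PySem.Set.update st (PySem.List.combinations facet k.toNat))) rbd)
    PySem.Dict.empty

-- one 'for lower_dim, remove_set in remove_by_dim.items()' pruning step
def gfPrune (cand : PySem.Dict Int (List (List Int))) (pr : Int × PySem.Set (List Int)) :
    PySem.Dict Int (List (List Int)) :=
  if !(cand.contains pr.1) || (cand.getD pr.1 []).isEmpty then cand
  else cand.insert pr.1 ((cand.getD pr.1 []).filter (fun s => !(PySem.Set.contains pr.2 s)))

-- body of A's main 'for dim in sorted(candidate_by_dim.keys(), reverse=True)' loop;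
-- state = (candidate_by_dim, higher_facet_sets, facets_by_dim)
def gfStepA
    (st : PySem.Dict Int (List (List Int)) × List (PySem.Set Int) × PySem.Dict Int (List (List Int)))
    (dim : Int) :
    PySem.Dict Int (List (List Int)) × List (PySem.Set Int) × PySem.Dict Int (List (List Int)) :=
  let cur := st.1.getD dim []
  if cur.isEmpty then st
  else
    let remaining := cur.filter
      (fun s => !(st.2.1.any (fun h => PySem.Set.issubset (PySem.Set.ofList s) h)))
    let fbd := st.2.2.insert dim remaining
    let hfs := st.2.1 ++ remaining.map (fun s => PySem.Set.ofList s)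
    let rbd := gfRemoveByDim remaining
    let cand := rbd.items.foldl gfPrune st.1
    (cand, hfs, fbd)

def get_facets (simplices : List (Int × List (List Int))) (dimension : Option Int) : List (List Int) :=
  let d := PySem.Dict.ofList simplices
  let cand0 := (PySem.List.sorted d.keys (fun x => x) true).foldl
      (fun c k => c.insert k (d.getD k [])) PySem.Dict.empty
  let st := (PySem.List.sorted cand0.keys (fun x => x) true).foldl gfStepA
      (cand0, [], PySem.Dict.empty)
  let fbd := st.2.2
  let facets := (PySem.List.sorted fbd.keys (fun x => x) true).foldl
      (fun acc k => acc ++ fbd.getD k []) []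
  match dimension with
  | none => facets
  | some dv => facets.filter (fun f => (f.length : Int) == dv + 1)

-- ===== PORT B =====
def get_facets_alt (simplices : List (Int × List (List Int))) (dimension : Option Int) : List (List Int) :=
  let d := PySem.Dict.ofList simplices
  let st := (PySem.List.sorted d.keys (fun x => x) true).foldl
    (fun st dim =>
      let kept := (d.getD dim []).filter
        (fun s => !(st.2.any (fun t => PySem.Set.issubset (PySem.Set.ofList s) t)))
      (st.1 ++ kept, st.2 ++ kept.map (fun s => PySem.Set.ofList s)))
    ([], [])
  match dimension with
  | none => st.1
  | some dv => st.1.filter (fun f => (f.length : Int) == dv + 1)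

-- ===== PRECONDITION & SPEC =====
def Spec_get_facets (simplices : List (Int × List (List Int))) (dimension : Option Int) (out : List (List Int)) : Prop := out = get_facets_alt simplices dimension
instance (simplices : List (Int × List (List Int))) (dimension : Option Int) (out : List (List Int)) : Decidable (Spec_get_facets simplices dimension out) := by unfold Spec_get_facets; infer_instance

-- ===== CLAIM (what is proved, stated in full; the proofs are below) =====
def Claim_equal_get_facets : Prop := ∀ (simplices : List (Int × List (List Int))) (dimension : Option Int), Dom_get_facets simplices dimension → Spec_get_facets simplices dimension (get_facets simplices dimension)

-- ===== LEMMAS AND PROOFS =====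

-- 'any(simplex_set.issubset(h) for h in hfs)'
def gfSub (hfs : List (PySem.Set Int)) (s : List Int) : Bool :=
  hfs.any (fun h => PySem.Set.issubset (PySem.Set.ofList s) h)

-- invariant: every candidate list is the original one minus elements already covered by hfs
def gfInv (base cand : PySem.Dict Int (List (List Int))) (hfs : List (PySem.Set Int)) : Prop :=
  ∀ k : Int, ∃ q : List Int → Bool,
    cand.getD k [] = (base.getD k []).filter q ∧
    ∀ s ∈ base.getD k [], q s = false → gfSub hfs s = true

-- body of B's loop, reading from the fixed base dict
def gfStepB (base : PySem.Dict Int (List (List Int)))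
    (st : List (List Int) × List (PySem.Set Int)) (dim : Int) :
    List (List Int) × List (PySem.Set Int) :=
  let kept := (base.getD dim []).filter (fun s => !(gfSub st.2 s))
  (st.1 ++ kept, st.2 ++ kept.map (fun s => PySem.Set.ofList s))


lemma gfSub_mono (hfs ex : List (PySem.Set Int)) (s : List Int) (h : gfSub hfs s = true) :
    gfSub (hfs ++ ex) s = true := by
  simp [gfSub] at h ⊢; exact Or.inl h

lemma gfInv_mono (base cand : PySem.Dict Int (List (List Int))) (hfs ex : List (PySem.Set Int))
    (h : gfInv base cand hfs) : gfInv base cand (hfs ++ ex) := by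
  intro k
  obtain ⟨q, hq1, hq2⟩ := h k
  exact ⟨q, hq1, fun s hs hf => gfSub_mono hfs ex s (hq2 s hs hf)⟩

lemma gfInv_filter (base cand : PySem.Dict Int (List (List Int))) (hfs : List (PySem.Set Int))
    (ld : Int) (p : List Int → Bool) (h : gfInv base cand hfs)
    (hp : ∀ s, p s = false → gfSub hfs s = true) :
    gfInv base (cand.insert ld ((cand.getD ld []).filter p)) hfs := by
  intro k
  by_cases hk : k = ld
  · subst hk
    obtain ⟨q, hq1, hq2⟩ := h k
    refine ⟨fun s => p s && q s, ?_, ?_⟩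
    · rw [PySem.Dict.getD_insert]
      simp [hq1, List.filter_filter]
    · intro s hs hf
      rcases Bool.and_eq_false_iff.mp hf with hf | hf
      · exact hp s hf
      · exact hq2 s hs hf
  · obtain ⟨q, hq1, hq2⟩ := h k
    refine ⟨q, ?_, hq2⟩
    rw [PySem.Dict.getD_insert, if_neg hk, hq1]

lemma gfInv_prune (base : PySem.Dict Int (List (List Int))) (hfs : List (PySem.Set Int)) :
    ∀ (prs : List (Int × PySem.Set (List Int))) (cand : PySem.Dict Int (List (List Int))),
    gfInv base cand hfs →
    (∀ pr ∈ prs, ∀ s : List Int, PySem.Set.contains pr.2 s = true → gfSub hfs s = true) →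
    gfInv base (prs.foldl gfPrune cand) hfs := by
  intro prs
  induction prs with
  | nil => intro cand h _; exact h
  | cons pr t ih =>
    intro cand h hp
    simp only [List.foldl_cons]
    refine ih _ ?_ (fun pr' h' s hc => hp pr' (List.mem_cons_of_mem _ h') s hc)
    unfold gfPrune
    split
    · exact h
    · exact gfInv_filter base cand hfs pr.1 _ h
        (fun s hf => hp pr (List.mem_cons_self ..) s (by simpa using hf))

lemma gf_mem_update {α : Type} [BEq α] [LawfulBEq α] (xs : List α) (s : PySem.Set α) (y : α)
    (h : y ∈ PySem.Set.update s xs) : y ∈ s ∨ y ∈ xs := by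
  induction xs generalizing s with
  | nil => exact Or.inl h
  | cons x t ih =>
    simp only [PySem.Set.update, List.foldl_cons] at h
    rcases ih (PySem.Set.add s x) h with h' | h'
    · rcases (PySem.Set.mem_add s x y).mp h' with h'' | h''
      · exact Or.inl h''
      · exact Or.inr (by simp [h''])
    · exact Or.inr (List.mem_cons_of_mem _ h')

-- "every tuple in any remove-set is an in-order sub-tuple of some accepted facet"
def gfRP (remaining : List (List Int)) (rbd : PySem.Dict Int (PySem.Set (List Int))) : Prop :=
  ∀ pr ∈ rbd.items, ∀ s : List Int,
    PySem.Set.contains pr.2 s = true → ∃ f ∈ remaining, s.Sublist f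

lemma gf_inner_sound (remaining : List (List Int)) (facet : List Int) (hf : facet ∈ remaining) :
    ∀ (ks : List Int) (rbd : PySem.Dict Int (PySem.Set (List Int))), gfRP remaining rbd →
    gfRP remaining (ks.foldl (fun rbd k =>
      rbd.modify (k - 1) PySem.Set.empty
        (fun st => PySem.Set.update st (PySem.List.combinations facet k.toNat))) rbd) := by
  intro ks
  induction ks with
  | nil => intro rbd h; exact h
  | cons k t ih =>
    intro rbd h
    simp only [List.foldl_cons]
    refine ih _ ?_
    intro pr hpr s hc
    simp only [PySem.Dict.modify] at hpr
    rcases (PySem.Dict.mem_items_insert _ _ _ _).mp hpr with hpr | ⟨hpr, _⟩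
    · subst hpr
      simp only [PySem.Set.contains, List.contains_iff_mem] at hc
      rcases gf_mem_update _ _ _ hc with hm | hm
      · rw [PySem.Dict.getD_eq_get?_getD] at hm
        cases hget : rbd.get? (k - 1) with
        | none => rw [hget] at hm; simp [PySem.Set.empty] at hm
        | some v0 =>
          rw [hget] at hm
          exact h (k - 1, v0) (PySem.Dict.mem_items_of_get?_eq_some _ hget) s
            (by simpa [PySem.Set.contains, List.contains_iff_mem] using hm)
      · exact ⟨facet, hf, PySem.List.sublist_of_mem_combinations hm⟩
    · exact h pr hpr s hc

lemma gfRemove_sound (remaining : List (List Int)) :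
    ∀ pr ∈ (gfRemoveByDim remaining).items, ∀ s : List Int,
    PySem.Set.contains pr.2 s = true → ∃ f ∈ remaining, s.Sublist f := by
  have main : ∀ (fs : List (List Int)) (rbd : PySem.Dict Int (PySem.Set (List Int))),
      (∀ f ∈ fs, f ∈ remaining) → gfRP remaining rbd →
      gfRP remaining (fs.foldl (fun rbd facet =>
        (PySem.List.pyRange 1 (facet.length : Int) 1).foldl (fun rbd k =>
          rbd.modify (k - 1) PySem.Set.empty
            (fun st => PySem.Set.update st (PySem.List.combinations facet k.toNat))) rbd) rbd) := by
    intro fs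
    induction fs with
    | nil => intro rbd _ h; exact h
    | cons f t ih =>
      intro rbd hsub h
      simp only [List.foldl_cons]
      exact ih _ (fun f' hf' => hsub f' (List.mem_cons_of_mem _ hf'))
        (gf_inner_sound remaining f (hsub f (List.mem_cons_self ..)) _ rbd h)
  exact main remaining PySem.Dict.empty (fun f hf => hf)
    (by intro pr hpr; simp [PySem.Dict.empty] at hpr)

lemma gf_keys_nodup (d : PySem.Dict Int (List (List Int))) (h : d.keys.Pairwise (· > ·)) :
    d.keys.Nodup := h.imp (fun hab => by omega)

lemma gf_extract (d : PySem.Dict Int (List (List Int))) (h : d.keys.Pairwise (· > ·)) :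
    (PySem.List.sorted d.keys (fun x => x) true).foldl (fun acc k => acc ++ d.getD k []) []
      = (d.items.map Prod.snd).flatten := by
  rw [PySem.List.sorted_rev_eq_of_perm_of_pairwise_gt d.keys d.keys (fun x => x) (List.Perm.refl _) h]
  rw [PySem.List.foldl_append_eq_flatMap]
  have hnd := gf_keys_nodup d h
  simp only [PySem.Dict.keys, List.nil_append] at *
  rw [List.flatMap_map]
  have hco : ∀ pr ∈ d.items, d.getD pr.1 [] = pr.2 := by
    intro pr hpr
    exact PySem.Dict.getD_of_mem_items d (by rw [← Prod.mk.eta (p := pr)] at hpr; exact hpr) hnd []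
  calc d.items.flatMap (fun pr => d.getD pr.1 [])
      = d.items.flatMap Prod.snd := List.flatMap_congr hco
    _ = (d.items.map Prod.snd).flatten := by rw [List.flatMap_def]

lemma gf_loop (base : PySem.Dict Int (List (List Int))) :
    ∀ (dims : List Int) (cand : PySem.Dict Int (List (List Int)))
      (hfs : List (PySem.Set Int)) (fbd : PySem.Dict Int (List (List Int)))
      (acc : List (List Int)),
    dims.Pairwise (· > ·) →
    (∀ k ∈ dims, ∀ p ∈ fbd.keys, k < p) →
    fbd.keys.Pairwise (· > ·) →
    (fbd.items.map Prod.snd).flatten = acc →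
    gfInv base cand hfs →
    (dims.foldl gfStepA (cand, hfs, fbd)).2.1 = (dims.foldl (gfStepB base) (acc, hfs)).2 ∧
    (dims.foldl gfStepA (cand, hfs, fbd)).2.2.keys.Pairwise (· > ·) ∧
    ((dims.foldl gfStepA (cand, hfs, fbd)).2.2.items.map Prod.snd).flatten
      = (dims.foldl (gfStepB base) (acc, hfs)).1 := by
  intro dims
  induction dims with
  | nil =>
    intro cand hfs fbd acc _ _ hpw hflat _
    exact ⟨rfl, hpw, hflat⟩
  | cons dim t ih =>
    intro cand hfs fbd acc hdims hgt hpw hflat hinv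
    obtain ⟨q, hq1, hq2⟩ := hinv dim
    have hkeptB : gfStepB base (acc, hfs) dim
        = (acc ++ (base.getD dim []).filter (fun s => !(gfSub hfs s)),
           hfs ++ ((base.getD dim []).filter (fun s => !(gfSub hfs s))).map
             (fun s => PySem.Set.ofList s)) := rfl
    by_cases h0 : (cand.getD dim []).isEmpty
    · -- A skips the dimension; B keeps nothing there either
      have hstepA : gfStepA (cand, hfs, fbd) dim = (cand, hfs, fbd) := by
        simp only [gfStepA]; rw [if_pos h0]
      have hnil : ∀ s ∈ base.getD dim [], q s = false := by
        rw [List.isEmpty_iff] at h0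
        rw [hq1] at h0
        exact fun s hs => Bool.eq_false_iff.mpr (List.filter_eq_nil_iff.mp h0 s hs)
      have hkept0 : (base.getD dim []).filter (fun s => !(gfSub hfs s)) = [] := by
        refine List.filter_eq_nil_iff.mpr (fun s hs => ?_)
        simp [hq2 s hs (hnil s hs)]
      have hstepB : gfStepB base (acc, hfs) dim = (acc, hfs) := by
        rw [hkeptB, hkept0]; simp
      simp only [List.foldl_cons, hstepA, hstepB]
      exact ih cand hfs fbd acc hdims.of_cons
        (fun k hk => hgt k (List.mem_cons_of_mem _ hk)) hpw hflat hinv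
    · -- A processes the dimension; its remaining list is exactly B's kept list
      have hrem : (cand.getD dim []).filter (fun s => !(gfSub hfs s))
          = (base.getD dim []).filter (fun s => !(gfSub hfs s)) := by
        rw [hq1, List.filter_filter]
        refine List.filter_congr (fun s hs => ?_)
        cases hqs : q s with
        | true => simp
        | false => simp [hq2 s hs hqs]
      set kept := (base.getD dim []).filter (fun s => !(gfSub hfs s)) with hkdef
      have hdimnotin : dim ∉ fbd.keys := by
        intro hmem
        exact absurd (hgt dim (List.mem_cons_self ..) dim hmem) (by omega)
      have hcont : fbd.contains dim = false := by
        rw [← Bool.not_eq_true, PySem.Dict.contains_iff_mem_keys]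
        exact hdimnotin
      have hitems' : (fbd.insert dim kept).items = fbd.items ++ [(dim, kept)] :=
        PySem.Dict.items_insert_of_not_contains fbd kept hcont
      have hkeys' : (fbd.insert dim kept).keys = fbd.keys ++ [dim] := by
        simp [PySem.Dict.keys, hitems']
      have hstepA : gfStepA (cand, hfs, fbd) dim
          = ((gfRemoveByDim kept).items.foldl gfPrune cand,
             hfs ++ kept.map (fun s => PySem.Set.ofList s),
             fbd.insert dim kept) := by
        simp only [gfStepA]
        rw [if_neg (by simpa using h0)]
        have hx : List.filter (fun s => !(hfs.any (fun h => PySem.Set.issubset (PySem.Set.ofList s) h)))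
            (cand.getD dim []) = kept := hrem
        rw [hx]
      have hsub' : ∀ pr ∈ (gfRemoveByDim kept).items, ∀ s : List Int,
          PySem.Set.contains pr.2 s = true
            → gfSub (hfs ++ kept.map (fun s => PySem.Set.ofList s)) s = true := by
        intro pr hpr s hc
        obtain ⟨f, hf, hsl⟩ := gfRemove_sound kept pr hpr s hc
        have hss : PySem.Set.issubset (PySem.Set.ofList s) (PySem.Set.ofList f) = true := by
          rw [PySem.Set.issubset_iff]
          intro x hx
          rw [PySem.Set.mem_ofList] at hx ⊢
          exact hsl.subset hx
        simp only [gfSub, List.any_append, List.any_map, Bool.or_eq_true]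
        exact Or.inr (List.any_eq_true.mpr ⟨f, hf, hss⟩)
      have hinv' : gfInv base ((gfRemoveByDim kept).items.foldl gfPrune cand)
          (hfs ++ kept.map (fun s => PySem.Set.ofList s)) :=
        gfInv_prune base _ _ cand (gfInv_mono base cand hfs _ hinv) hsub'
      have hpw' : (fbd.insert dim kept).keys.Pairwise (· > ·) := by
        rw [hkeys', List.pairwise_append]
        exact ⟨hpw, List.pairwise_singleton _ _,
          fun a ha b hb => by
            rw [List.mem_singleton] at hb; rw [hb]
            exact hgt dim (List.mem_cons_self ..) a ha⟩
      have hgt' : ∀ k ∈ t, ∀ p ∈ (fbd.insert dim kept).keys, k < p := by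
        intro k hk p hp
        rw [hkeys', List.mem_append, List.mem_singleton] at hp
        rcases hp with hp | hp
        · exact hgt k (List.mem_cons_of_mem _ hk) p hp
        · subst hp
          exact (List.pairwise_cons.mp hdims).1 k hk
      have hflat' : ((fbd.insert dim kept).items.map Prod.snd).flatten = acc ++ kept := by
        rw [hitems']; simp [hflat]
      simp only [List.foldl_cons, hstepA, hkeptB]
      exact ih _ _ _ _ hdims.of_cons hgt' hpw' hflat' hinv'



-- ===== VERDICT (by name: the statement is the Claim_ definition above) =====
theorem get_facets_spec : Claim_equal_get_facets := by
  unfold Claim_equal_get_facets Spec_get_facets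
  intro simplices dimension _
  simp only [get_facets, get_facets_alt]
  set d := PySem.Dict.ofList simplices with hd
  set sk := PySem.List.sorted d.keys (fun x => x) true with hsk
  have hknd : d.keys.Nodup := PySem.Dict.nodup_keys_ofList simplices
  have hsknd : sk.Nodup := (PySem.List.sorted_perm d.keys (fun x => x) true).nodup_iff.mpr hknd
  have hskpw : sk.Pairwise (· > ·) := by
    have h1 := PySem.List.sorted_pairwise_rev d.keys (fun x => x)
    rw [← hsk] at h1
    exact (List.Pairwise.and h1 hsknd).imp (fun hab => lt_of_le_of_ne hab.1 (Ne.symm hab.2))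
  set cand0 := sk.foldl (fun c k => c.insert k (d.getD k [])) PySem.Dict.empty with hc0def
  have hitems : cand0.items = sk.map (fun k => (k, d.getD k [])) := by
    have h := PySem.Dict.items_foldl_insert_fresh sk (fun k => k) (fun k => d.getD k [])
      PySem.Dict.empty (fun a _ => PySem.Dict.contains_empty a) (by simpa using hsknd)
    simpa [hc0def] using h
  have hkeys0 : cand0.keys = sk := by
    simp [PySem.Dict.keys, hitems, List.map_map, Function.comp_def]
  have hgetD0 : ∀ k, cand0.getD k [] = d.getD k [] := by
    intro k
    by_cases hk : k ∈ sk
    · exact PySem.Dict.getD_of_mem_items cand0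
        (by rw [hitems]; exact List.mem_map.mpr ⟨k, hk, rfl⟩) (by rw [hkeys0]; exact hsknd) []
    · have hk' : k ∉ d.keys := fun h =>
        hk ((PySem.List.mem_sorted d.keys (fun x => x) true k).mpr h)
      rw [PySem.Dict.getD_of_get?_eq_none cand0 []
            ((PySem.Dict.get?_eq_none_iff_not_mem_keys cand0 k).mpr (by rw [hkeys0]; exact hk)),
          PySem.Dict.getD_of_get?_eq_none d []
            ((PySem.Dict.get?_eq_none_iff_not_mem_keys d k).mpr hk')]
  have hsorted2 : PySem.List.sorted cand0.keys (fun x => x) true = sk := by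
    rw [hkeys0, hsk]
    exact PySem.List.sorted_rev_sorted_rev d.keys (fun x => x)
  have hinv0 : gfInv d cand0 [] := by
    intro k
    exact ⟨fun _ => true, by rw [hgetD0 k, List.filter_true], by simp⟩
  obtain ⟨-, hpwF, hflatF⟩ :=
    gf_loop d sk cand0 [] PySem.Dict.empty [] hskpw
      (by intro k _ p hp; rw [PySem.Dict.keys_empty] at hp; cases hp)
      (by rw [PySem.Dict.keys_empty]; exact List.Pairwise.nil)
      (by simp [PySem.Dict.empty])
      hinv0
  rw [hsorted2]
  have hBfold : sk.foldl
      (fun st dim =>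
        (st.1 ++ (d.getD dim []).filter
            (fun s => !(st.2.any (fun t => PySem.Set.issubset (PySem.Set.ofList s) t))),
         st.2 ++ ((d.getD dim []).filter
            (fun s => !(st.2.any (fun t => PySem.Set.issubset (PySem.Set.ofList s) t)))).map
              (fun s => PySem.Set.ofList s)))
      ([], []) = sk.foldl (gfStepB d) ([], []) := rfl
  rw [hBfold]
  rw [gf_extract _ hpwF, hflatF]
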